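-- pv_equiv track=rewrite | github.com/arun037/demo-deploy | analytics/backend/agents/schema_analyzer.py | _pick_best_connection
-- ===== SOURCE A (Python) =====
-- def _pick_best_connection(connections):
--     """
--     Intelligently pick the best FK connection from a list of options.
--     Uses generic heuristics  NO hardcoded column names.
--
--     Priority order:
--     1. source_col == target_col (exact name match = strongest signal)
--     2. source_col contains target_col or vice versa (partial match)
--     3. First connection in list (fallback)
--     """
--     if len(connections) == 1:
--         return connections[0]
--
--     # Priority 1: Exact column name match (e.g., site_id == site_id, fbo_id == fbo_id)
--     for conn in connections:
--         source_col, target_col = conn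
--         if source_col == target_col:
--             return conn
--
--     # Priority 2: One column name contains the other
--     for conn in connections:
--         source_col, target_col = conn
--         if source_col in target_col or target_col in source_col:
--             return conn
--
--     # Fallback: first connection
--     return connections[0]
-- ===== SOURCE B (Python) =====
-- def _pick_best_connection(connections):
--     partial = None
--     for conn in connections:
--         source_col, target_col = conn
--         if source_col == target_col:
--             return conn
--         if partial is None and (source_col in target_col or target_col in source_col):
--             partial = conn
--     return partial if partial is not None else connections[0]
-- ===== Notes on version B (the rewrite author's own statement) =====
-- stated objective: simpler
-- what changed: Collapses A's three sequential scans (exact-match scan, partial-match scan, fallback plus a redundant len==1 guard) into one pass that returns an exact match immediately and remembers the first partial match in a single variable.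
import Mathlib
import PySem

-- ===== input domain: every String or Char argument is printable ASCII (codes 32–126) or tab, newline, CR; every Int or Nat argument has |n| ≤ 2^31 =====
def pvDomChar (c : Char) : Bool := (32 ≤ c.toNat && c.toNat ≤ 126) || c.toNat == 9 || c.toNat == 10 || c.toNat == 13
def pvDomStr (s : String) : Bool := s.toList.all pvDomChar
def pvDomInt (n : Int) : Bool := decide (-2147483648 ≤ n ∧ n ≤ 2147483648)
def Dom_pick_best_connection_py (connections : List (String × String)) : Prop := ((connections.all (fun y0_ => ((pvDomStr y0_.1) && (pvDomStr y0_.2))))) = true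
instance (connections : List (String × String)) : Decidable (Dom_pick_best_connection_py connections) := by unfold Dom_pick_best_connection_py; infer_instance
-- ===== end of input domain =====

-- B replaces A's three sequential scans by a single pass with a `partial` tracker (objective: simpler).

-- ===== PORT A =====
-- Priority-1 scan: first connection with source_col == target_col
def pvALoop1 : List (String × String) → Option (String × String)
  | [] => none
  | c :: rest => if c.1 = c.2 then some c else pvALoop1 rest

-- Priority-2 scan: first connection where one column name contains the other
def pvALoop2 : List (String × String) → Option (String × String)
  | [] => none
  | c :: rest =>
      if PySem.Str.isIn c.1 c.2 || PySem.Str.isIn c.2 c.1 then some c else pvALoop2 rest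

def pick_best_connection_py (connections : List (String × String)) : String × String :=
  if connections.length = 1 then connections.headD ("", "")
  else
    match pvALoop1 connections with
    | some c => c
    | none =>
      match pvALoop2 connections with
      | some c => c
      | none => connections.headD ("", "")   -- connections[0]; Pre_ excludes []

-- ===== PORT B =====
-- single pass: `some c` = early return on exact match, or the final `partial`
def pvBLoop : List (String × String) → Option (String × String) → Option (String × String)
  | [], p => p
  | c :: rest, p =>
      if c.1 = c.2 then some c
      else pvBLoop rest
        (if p.isNone && (PySem.Str.isIn c.1 c.2 || PySem.Str.isIn c.2 c.1) then some c else p)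

def pick_best_connection_py_alt (connections : List (String × String)) : String × String :=
  match pvBLoop connections none with
  | some c => c
  | none => connections.headD ("", "")   -- connections[0]; Pre_ excludes []

-- ===== PRECONDITION & SPEC =====
-- Pre_ excludes the empty list, on which both A and B raise IndexError (connections[0]).
def Pre_pick_best_connection_py (connections : List (String × String)) : Prop := connections ≠ []
instance (connections : List (String × String)) : Decidable (Pre_pick_best_connection_py connections) := by unfold Pre_pick_best_connection_py; infer_instance
def pvWitness_pick_best_connection_py : (List (String × String)) := [("a_id", "id"), ("x", "x")]

def Spec_pick_best_connection_py (connections : List (String × String)) (out : String × String) : Prop := out = pick_best_connection_py_alt connections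
instance (connections : List (String × String)) (out : String × String) : Decidable (Spec_pick_best_connection_py connections out) := by unfold Spec_pick_best_connection_py; infer_instance

-- ===== CLAIM (what is proved, stated in full; the proofs are below) =====
def Claim_equal_pick_best_connection_py : Prop := ∀ (connections : List (String × String)), Dom_pick_best_connection_py connections → Pre_pick_best_connection_py connections → Spec_pick_best_connection_py connections (pick_best_connection_py connections)

-- ===== LEMMAS AND PROOFS =====

-- an exact match found by A's first scan makes B return early with the same connection
theorem pvBLoop_of_loop1_some (cs : List (String × String)) (c : String × String)
    (h : pvALoop1 cs = some c) : ∀ p, pvBLoop cs p = some c := by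
  induction cs with
  | nil => simp [pvALoop1] at h
  | cons d rest ih =>
      intro p
      by_cases hd : d.1 = d.2
      · have hdc : d = c := by simpa [pvALoop1, hd] using h
        subst hdc
        show (if d.1 = d.2 then some d else _) = some d
        rw [if_pos hd]
      · have h' : pvALoop1 rest = some c := by simpa [pvALoop1, hd] using h
        show (if d.1 = d.2 then some d else pvBLoop rest _) = some c
        rw [if_neg hd, ih h']

-- with no exact match, B's pass returns the incoming partial if set, else A's second scan
theorem pvBLoop_of_loop1_none (cs : List (String × String))
    (h : pvALoop1 cs = none) : ∀ p, pvBLoop cs p = p.or (pvALoop2 cs) := by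
  induction cs with
  | nil => intro p; cases p <;> rfl
  | cons d rest ih =>
      intro p
      by_cases hd : d.1 = d.2
      · simp [pvALoop1, hd] at h
      · have hrest : pvALoop1 rest = none := by simpa [pvALoop1, hd] using h
        show (if d.1 = d.2 then some d
              else pvBLoop rest
                (if p.isNone && (PySem.Str.isIn d.1 d.2 || PySem.Str.isIn d.2 d.1) then some d else p))
             = p.or (if PySem.Str.isIn d.1 d.2 || PySem.Str.isIn d.2 d.1 then some d else pvALoop2 rest)
        rw [if_neg hd]
        cases p with
        | some q =>
            rw [show ((some q).isNone && (PySem.Str.isIn d.1 d.2 || PySem.Str.isIn d.2 d.1)) = false from rfl]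
            rw [if_neg (by decide : ¬ (false = true)), ih hrest]
            rfl
        | none =>
            rw [show ((none : Option (String × String)).isNone
                  && (PySem.Str.isIn d.1 d.2 || PySem.Str.isIn d.2 d.1))
                = (PySem.Str.isIn d.1 d.2 || PySem.Str.isIn d.2 d.1) from Bool.true_and _]
            by_cases hm : (PySem.Str.isIn d.1 d.2 || PySem.Str.isIn d.2 d.1) = true
            · rw [if_pos hm, if_pos hm, ih hrest]
              rfl
            · rw [if_neg hm, if_neg hm, ih hrest]

-- ===== VERDICT (by name: the statement is the Claim_ definition above) =====
theorem pick_best_connection_py_spec : Claim_equal_pick_best_connection_py := by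
  intro cs _ hpre
  unfold Spec_pick_best_connection_py pick_best_connection_py pick_best_connection_py_alt
  match cs, hpre with
  | [c], _ =>
      have hl1 : ([c] : List (String × String)).length = 1 := rfl
      rw [if_pos hl1]
      show [c].headD ("", "")
        = (match pvBLoop [c] none with
           | some e => e
           | none => [c].headD ("", ""))
      by_cases hc : c.1 = c.2
      · rw [show pvBLoop [c] none = some c from by
            show (if c.1 = c.2 then some c else _) = some c
            rw [if_pos hc]]
        try rfl
      · rw [pvBLoop_of_loop1_none [c] (by
            show (if c.1 = c.2 then some c else pvALoop1 []) = none
            rw [if_neg hc]; rfl) none, Option.none_or]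
        show [c].headD ("", "")
          = (match (if PySem.Str.isIn c.1 c.2 || PySem.Str.isIn c.2 c.1 then some c
                    else pvALoop2 []) with
             | some e => e
             | none => [c].headD ("", ""))
        by_cases hm : (PySem.Str.isIn c.1 c.2 || PySem.Str.isIn c.2 c.1) = true
        · rw [if_pos hm]
          try rfl
        · rw [if_neg hm]; rfl
  | c :: d :: rs, _ =>
      have hlen : ¬ (c :: d :: rs).length = 1 := by simp
      rw [if_neg hlen]
      cases h1 : pvALoop1 (c :: d :: rs) with
      | some e =>
          rw [pvBLoop_of_loop1_some _ _ h1]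
      | none =>
          rw [pvBLoop_of_loop1_none _ h1 none, Option.none_or]
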